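-- pv_equiv track=rewrite | github.com/Dadams2/query-data-predictor | src/query_data_predictor/summariser.py | convert_itemset_to_summary
-- ===== SOURCE A (Python) =====
-- from typing import Any, Dict, List, Optional
--
-- def convert_itemset_to_summary(itemset: tuple, attributes: List[str]) -> Dict[str, str]:
--     """
--     Convert a frequent itemset (e.g. ("primtarget_4", "specclass_3"))
--     into a full candidate summary dictionary. For each attribute, if an item
--     from the itemset matches that attribute (assumed format "attribute_value"),
--     that value is assigned; otherwise a wildcard '*' is used.
--
--     Parameters
--     ----------
--     itemset : tuple
--         Frequent itemset.
--     attributes : List[str]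
--         List of attribute names.
--
--     Returns
--     -------
--     Dict[str, str]
--         Candidate summary as a dictionary.
--     """
--     summary = {attr: "*" for attr in attributes}
--     for item in itemset:
--         parts = item.split("_", 1)
--         if len(parts) == 2:
--             attr_name = parts[0]
--             if attr_name in attributes:
--                 summary[attr_name] = item
--     return summary
-- ===== SOURCE B (Python) =====
-- def convert_itemset_to_summary(itemset, attributes):
--     # Attribute-driven: for each attribute, search the itemset back-to-front for
--     # the most recent item of the form "<attr>_<value>"; no mutable summary dict,
--     # no pre-fill/overwrite pass.
--     def value_for(attr):
--         for item in reversed(itemset):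
--             parts = item.split("_", 1)
--             if len(parts) == 2 and parts[0] == attr:
--                 return item
--         return "*"
--     return {attr: value_for(attr) for attr in attributes}
-- ===== Notes on version B (the rewrite author's own statement) =====
-- stated objective: alternative
-- what changed: B inverts the control flow: instead of A's pre-fill-with-'*' dict mutated in place by one itemset-driven pass, B performs, for each attribute, an early-returning backward search of the itemset for the most recent matching item (last-writer-wins becomes first-match-of-the-reverse), with no mutable summary and no membership test; it trades A's single pass for one stateless scan per attribute, so it is slower on large inputs.
import Mathlib
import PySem

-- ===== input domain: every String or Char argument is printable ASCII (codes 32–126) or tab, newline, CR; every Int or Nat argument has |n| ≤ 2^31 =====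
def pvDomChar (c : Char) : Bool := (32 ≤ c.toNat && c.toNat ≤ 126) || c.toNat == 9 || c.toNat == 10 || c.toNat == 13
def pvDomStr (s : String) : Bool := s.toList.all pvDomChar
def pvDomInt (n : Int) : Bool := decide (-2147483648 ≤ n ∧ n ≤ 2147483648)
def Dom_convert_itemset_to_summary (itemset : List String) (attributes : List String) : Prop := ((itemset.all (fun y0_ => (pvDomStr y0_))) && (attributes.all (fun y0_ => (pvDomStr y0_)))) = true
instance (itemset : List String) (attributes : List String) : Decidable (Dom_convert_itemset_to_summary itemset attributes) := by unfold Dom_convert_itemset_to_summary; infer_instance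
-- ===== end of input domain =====

-- B inverts the control flow: per attribute, an early-returning backward search of the itemset,
-- instead of A's pre-filled summary dict mutated by a pass over the itemset (objective: alternative).

-- ===== PORT A =====
-- summary = {attr: "*" for attr in attributes}; then for item in itemset: overwrite summary[parts[0]] when
-- parts = item.split("_", 1) has 2 parts and parts[0] in attributes.
-- splitMax? with sep "_" is always `some`; `.getD []` only unwraps it (exact).
def convert_itemset_to_summary (itemset : List String) (attributes : List String) : List (String × String) :=
  let summary : PySem.Dict String String :=
    attributes.foldl (fun d attr => d.insert attr "*") PySem.Dict.empty
  let summary :=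
    itemset.foldl (fun d item =>
      let parts := (PySem.Str.splitMax? item "_" 1).getD []
      if parts.length = 2 then
        let attr_name := parts.headD ""          -- parts[0] (in range: length = 2)
        if attributes.contains attr_name then d.insert attr_name item else d
      else d) summary
  summary.items

-- ===== PORT B =====
-- def value_for(attr): for item in reversed(itemset): parts = item.split("_",1);
--   if len(parts)==2 and parts[0]==attr: return item;  return "*"
-- the early `return` of the for-loop is the structural recursion's first matching branch
def pvValueFor (attr : String) : List String → String
  | [] => "*"
  | item :: rest =>
    let parts := (PySem.Str.splitMax? item "_" 1).getD []
    if parts.length = 2 ∧ parts.headD "" = attr then item else pvValueFor attr rest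

-- return {attr: value_for(attr) for attr in attributes}
def convert_itemset_to_summary_alt (itemset : List String) (attributes : List String) : List (String × String) :=
  (attributes.foldl (fun d attr => d.insert attr (pvValueFor attr itemset.reverse)) PySem.Dict.empty).items

-- ===== PRECONDITION & SPEC =====
def Spec_convert_itemset_to_summary (itemset : List String) (attributes : List String) (out : List (String × String)) : Prop := out = convert_itemset_to_summary_alt itemset attributes
instance (itemset : List String) (attributes : List String) (out : List (String × String)) : Decidable (Spec_convert_itemset_to_summary itemset attributes out) := by unfold Spec_convert_itemset_to_summary; infer_instance

-- ===== CLAIM (what is proved, stated in full; the proofs are below) =====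
def Claim_equal_convert_itemset_to_summary : Prop := ∀ (itemset : List String) (attributes : List String), Dom_convert_itemset_to_summary itemset attributes → Spec_convert_itemset_to_summary itemset attributes (convert_itemset_to_summary itemset attributes)

-- ===== LEMMAS AND PROOFS =====

-- the last item of l whose 2-part split prefix is k (the value A assigns to attribute k)
def pvLast (k : String) : List String → Option String
  | [] => none
  | item :: rest =>
    let tail := pvLast k rest
    if tail.isSome then tail
    else
      let parts := (PySem.Str.splitMax? item "_" 1).getD []
      if parts.length = 2 ∧ parts.headD "" = k then some item else none

-- B's backward search, as an Option (none = fell through to "*")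
def pvFind? (k : String) : List String → Option String
  | [] => none
  | item :: rest =>
    let parts := (PySem.Str.splitMax? item "_" 1).getD []
    if parts.length = 2 ∧ parts.headD "" = k then some item else pvFind? k rest

theorem pvValueFor_eq_find (k : String) : ∀ l : List String,
    pvValueFor k l = (pvFind? k l).getD "*" := by
  intro l
  induction l with
  | nil => rfl
  | cons item rest ih =>
    simp only [pvValueFor, pvFind?]
    split_ifs with h
    · rfl
    · exact ih

theorem pvFind?_append (k : String) : ∀ xs ys : List String,
    pvFind? k (xs ++ ys) = ((pvFind? k xs).or (pvFind? k ys)) := by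
  intro xs ys
  induction xs with
  | nil => simp [pvFind?]
  | cons item rest ih =>
    simp only [List.cons_append, pvFind?]
    split_ifs with h
    · rfl
    · exact ih

-- first match of the reversed list = last match of the list
theorem pvFind?_reverse (k : String) : ∀ l : List String,
    pvFind? k l.reverse = pvLast k l := by
  intro l
  induction l with
  | nil => rfl
  | cons item rest ih =>
    simp only [List.reverse_cons, pvFind?_append, ih, pvLast]
    cases hl : pvLast k rest with
    | some x => simp
    | none =>
      simp only [Option.none_or, Option.isSome_none, Bool.false_eq_true, if_false]
      simp [pvFind?]

-- a fold of inserts whose value depends only on the key: lookup is the value when the key occurs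
theorem pv_getD_foldl_insert_val (v : String → String) :
    ∀ (attrs : List String) (d : PySem.Dict String String) (k : String),
      (attrs.foldl (fun d a => d.insert a (v a)) d).getD k "*" =
        if k ∈ attrs then v k else d.getD k "*" := by
  intro attrs
  induction attrs with
  | nil => intro d k; simp
  | cons a rest ih =>
    intro d k
    simp only [List.foldl_cons, ih, List.mem_cons]
    by_cases hk : k ∈ rest
    · simp [hk]
    · by_cases hka : k = a
      · simp [hka, PySem.Dict.getD_insert]
      · simp [hk, hka, PySem.Dict.getD_insert]

-- A's overwrite pass computes pvLast on keys that are attributes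
theorem pv_getD_A (attributes : List String) :
    ∀ (l : List String) (d : PySem.Dict String String), ∀ k, k ∈ attributes →
      (l.foldl (fun d item =>
          let parts := (PySem.Str.splitMax? item "_" 1).getD []
          if parts.length = 2 then
            let attr_name := parts.headD ""
            if attributes.contains attr_name then d.insert attr_name item else d
          else d) d).getD k "*" =
        ((pvLast k l).map id).getD (d.getD k "*") := by
  intro l
  induction l with
  | nil => intro d k _; simp [pvLast]
  | cons item rest ih =>
    intro d k hk
    simp only [List.foldl_cons, ih _ _ hk, pvLast]
    cases hl : pvLast k rest with
    | some x => simp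
    | none =>
      simp only [Option.isSome_none, Bool.false_eq_true, if_false]
      by_cases h2 : ((PySem.Str.splitMax? item "_" 1).getD []).length = 2
      · by_cases hak : ((PySem.Str.splitMax? item "_" 1).getD []).head?.getD "" = k
        · subst hak
          simp [h2, hk, PySem.Dict.getD_insert]
        · by_cases hc : ((PySem.Str.splitMax? item "_" 1).getD []).head?.getD "" ∈ attributes
          · simp [h2, hak, hc, PySem.Dict.getD_insert, Ne.symm hak]
          · simp [h2, hak, hc]
      · simp [h2]

-- A's overwrite pass never changes the key list (every inserted key is already present)
theorem pv_keys_A (attributes : List String) :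
    ∀ (l : List String) (d : PySem.Dict String String),
      (∀ k, k ∈ attributes → d.contains k = true) →
      (l.foldl (fun d item =>
          let parts := (PySem.Str.splitMax? item "_" 1).getD []
          if parts.length = 2 then
            let attr_name := parts.headD ""
            if attributes.contains attr_name then d.insert attr_name item else d
          else d) d).keys = d.keys := by
  intro l
  induction l with
  | nil => intro d _; simp
  | cons item rest ih =>
    intro d hd
    simp only [List.foldl_cons]
    by_cases h2 : ((PySem.Str.splitMax? item "_" 1).getD []).length = 2
    · set a := ((PySem.Str.splitMax? item "_" 1).getD []).headD "" with ha
      by_cases hc : a ∈ attributes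
      · have hkeys : (d.insert a item).keys = d.keys :=
          PySem.Dict.keys_insert_of_contains _ _ (hd a hc)
        simp only [h2, if_true, hc, List.contains_iff_mem.mpr hc]
        rw [ih (d.insert a item) (by intro k hk; rw [PySem.Dict.contains_insert, hd k hk]; simp), hkeys]
      · simp only [h2, if_true]
        rw [if_neg (by simpa using hc)]
        exact ih d hd
    · simp only [h2, if_false]
      exact ih d hd

theorem convert_eq (itemset attributes : List String) :
    convert_itemset_to_summary itemset attributes = convert_itemset_to_summary_alt itemset attributes := by
  unfold convert_itemset_to_summary convert_itemset_to_summary_alt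
  -- initial dict of A: keys and lookups
  have hinitkeys : (attributes.foldl (fun d attr => d.insert attr "*") PySem.Dict.empty).keys
      = PySem.Set.ofList attributes := by
    rw [PySem.Dict.keys_foldl_insert]
    simp [PySem.Set.update_nil_left]
  have hinit_contains : ∀ k, k ∈ attributes →
      (attributes.foldl (fun d attr => d.insert attr "*") PySem.Dict.empty).contains k = true := by
    intro k hk
    rw [PySem.Dict.contains_iff_mem_keys, hinitkeys]
    exact (PySem.Set.mem_ofList _ _).mpr hk
  -- A's final dict
  have hAkeys := pv_keys_A attributes itemset _ hinit_contains
  rw [hinitkeys] at hAkeys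
  have hAnodup : (itemset.foldl (fun d item =>
      let parts := (PySem.Str.splitMax? item "_" 1).getD []
      if parts.length = 2 then
        let attr_name := parts.headD ""
        if attributes.contains attr_name then d.insert attr_name item else d
      else d) (attributes.foldl (fun d attr => d.insert attr "*") PySem.Dict.empty)).keys.Nodup := by
    rw [hAkeys]; exact PySem.Set.nodup_ofList _
  -- B's final dict
  have hBkeys : ((attributes.foldl (fun d attr =>
        d.insert attr (pvValueFor attr itemset.reverse)) PySem.Dict.empty)).keys
      = PySem.Set.ofList attributes := by
    rw [PySem.Dict.keys_foldl_insert]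
    simp [PySem.Set.update_nil_left]
  have hBnodup : ((attributes.foldl (fun d attr =>
        d.insert attr (pvValueFor attr itemset.reverse)) PySem.Dict.empty)).keys.Nodup :=
    PySem.Dict.nodup_keys_foldl_insert _ _ _ (by simp)
  rw [PySem.Dict.items_eq_map_keys _ hAnodup "*", PySem.Dict.items_eq_map_keys _ hBnodup "*",
    hAkeys, hBkeys]
  apply List.map_congr_left
  intro k hkset
  have hk : k ∈ attributes := (PySem.Set.mem_ofList _ _).mp hkset
  have hB := pv_getD_foldl_insert_val
      (fun a => pvValueFor a itemset.reverse) attributes PySem.Dict.empty k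
  rw [hB]
  simp only [hk, if_true]
  rw [pv_getD_A attributes itemset _ k hk, pvValueFor_eq_find, pvFind?_reverse]
  have hinit := pv_getD_foldl_insert_val (fun _ => "*") attributes PySem.Dict.empty k
  rw [hinit]
  simp [hk]

-- ===== VERDICT (by name: the statement is the Claim_ definition above) =====
theorem convert_itemset_to_summary_spec : Claim_equal_convert_itemset_to_summary := by
  intro itemset attributes _
  unfold Spec_convert_itemset_to_summary
  exact convert_eq itemset attributes
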